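-- pv_equiv track=rewrite | github.com/eskinderit/Radix-Sort-vs-Merge-Sort | RadixSort.py | bitwiseStableOrdering
-- ===== SOURCE A (Python) =====
-- def bitwiseStableOrdering(A,i):
--     B=[]
--     C=[0, 0]
--     mask = 2**i
--     for j in range(len(A)):
--         B.append(0)
--         C[(A[j] & mask)//mask] += 1
--     C[1]+= C[0]
--     for j in range(len(A)-1, -1, -1):
--         figure = (A[j] & mask)//mask
--         C[figure] -= 1
--         B[C[figure]] = A[j]
--     return B
-- ===== SOURCE B (Python) =====
-- def bitwiseStableOrdering(A, i):
--     mask = 2**i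
--     zeros = []
--     ones = []
--     for x in A:
--         if (x & mask)//mask == 0:
--             zeros.append(x)
--         else:
--             ones.append(x)
--     return zeros + ones
-- ===== Notes on version B (the rewrite author's own statement) =====
-- stated objective: simpler
-- what changed: Replaces the counting-sort machinery (count array, prefix sum, backward placement into a preallocated list) with a single forward pass that partitions elements into a zeros and a ones bucket and concatenates them.
import Mathlib
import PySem

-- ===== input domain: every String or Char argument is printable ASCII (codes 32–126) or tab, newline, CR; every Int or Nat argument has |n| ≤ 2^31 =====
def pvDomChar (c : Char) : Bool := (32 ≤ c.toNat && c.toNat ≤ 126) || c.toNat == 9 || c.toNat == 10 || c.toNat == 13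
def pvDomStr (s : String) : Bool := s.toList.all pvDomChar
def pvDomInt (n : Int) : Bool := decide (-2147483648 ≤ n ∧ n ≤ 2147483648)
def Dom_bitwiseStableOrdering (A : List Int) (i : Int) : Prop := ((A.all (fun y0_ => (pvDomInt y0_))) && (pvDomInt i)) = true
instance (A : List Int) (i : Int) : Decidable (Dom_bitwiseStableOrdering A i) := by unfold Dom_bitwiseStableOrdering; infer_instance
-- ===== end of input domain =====

-- B replaces A's counting-sort machinery (count array, prefix sum, backward placement) with one
-- forward partition into a zeros and a ones bucket, concatenated; same return value (objective: simpler).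

-- ===== PORT A =====
-- backward placement loop: processes j = k-1, k-2, …, 0 (Python's range(len(A)-1, -1, -1))
def bsoPlace (As : List Int) (mask : Int) : Nat → List Int → Int → Int → List Int
  | 0, B, _, _ => B
  | k+1, B, c0, c1 =>
      let x := PySem.List.pyGetD As (k : Int) 0
      let figure := PySem.Int.floordiv (PySem.Int.band x mask) mask
      if figure == 0 then
        bsoPlace As mask k (PySem.List.pySetD B (c0 - 1) x) (c0 - 1) c1
      else
        bsoPlace As mask k (PySem.List.pySetD B (c1 - 1) x) c0 (c1 - 1)

def bitwiseStableOrdering (A : List Int) (i : Int) : List Int :=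
  -- mask = 2**i; for i < 0 Python makes a float (and raises on '&' unless A = []): Pre_ below
  let mask : Int := 2 ^ i.toNat
  -- first loop: B.append(0) and C[(A[j] & mask)//mask] += 1  (the index is always 0 or 1)
  let s := A.foldl (fun (st : List Int × Int × Int) x =>
      if PySem.Int.floordiv (PySem.Int.band x mask) mask == 0
      then (st.1 ++ [(0 : Int)], st.2.1 + 1, st.2.2)
      else (st.1 ++ [(0 : Int)], st.2.1, st.2.2 + 1)) ([], 0, 0)
  -- C[1] += C[0], then the backward placement loop
  bsoPlace A mask A.length s.1 s.2.1 (s.2.2 + s.2.1)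

-- ===== PORT B =====
def bitwiseStableOrdering_alt (A : List Int) (i : Int) : List Int :=
  let mask : Int := 2 ^ i.toNat
  let p := A.foldl (fun (zo : List Int × List Int) x =>
      if PySem.Int.floordiv (PySem.Int.band x mask) mask == 0
      then (zo.1 ++ [x], zo.2)
      else (zo.1, zo.2 ++ [x])) ([], [])
  p.1 ++ p.2

-- ===== PRECONDITION & SPEC =====
-- Pre_ excludes nonempty A with i < 0, where Python's A (and B) raise TypeError ('int & float' on mask = 2**i)
def Pre_bitwiseStableOrdering (A : List Int) (i : Int) : Prop := A = [] ∨ 0 ≤ i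
instance (A : List Int) (i : Int) : Decidable (Pre_bitwiseStableOrdering A i) := by unfold Pre_bitwiseStableOrdering; infer_instance
def pvWitness_bitwiseStableOrdering : List Int × Int := ([5, 2, 7, 2, -3], 1)

def Spec_bitwiseStableOrdering (A : List Int) (i : Int) (out : List Int) : Prop := out = bitwiseStableOrdering_alt A i
instance (A : List Int) (i : Int) (out : List Int) : Decidable (Spec_bitwiseStableOrdering A i out) := by unfold Spec_bitwiseStableOrdering; infer_instance

-- ===== CLAIM (what is proved, stated in full; the proofs are below) =====
def Claim_equal_bitwiseStableOrdering : Prop := ∀ (A : List Int) (i : Int), Dom_bitwiseStableOrdering A i → Pre_bitwiseStableOrdering A i → Spec_bitwiseStableOrdering A i (bitwiseStableOrdering A i)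

-- ===== LEMMAS AND PROOFS =====

-- the bit-test predicate shared by both ports
def bsoP (mask : Int) (x : Int) : Bool := PySem.Int.floordiv (PySem.Int.band x mask) mask == 0

-- B's fold partitions: zeros bucket ++ ones bucket
lemma alt_fold (mask : Int) (s : List Int) (z o : List Int) :
    s.foldl (fun (zo : List Int × List Int) x =>
      if PySem.Int.floordiv (PySem.Int.band x mask) mask == 0
      then (zo.1 ++ [x], zo.2)
      else (zo.1, zo.2 ++ [x])) (z, o)
    = (z ++ s.filter (bsoP mask), o ++ s.filter (fun x => !bsoP mask x)) := by
  induction s generalizing z o with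
  | nil => simp
  | cons x t ih =>
      simp only [List.foldl_cons]
      by_cases h : bsoP mask x = true
      · have h' : (PySem.Int.floordiv (PySem.Int.band x mask) mask == 0) = true := h
        rw [if_pos h', ih, List.filter_cons_of_pos h, List.filter_cons_of_neg (by simp [h])]
        simp [List.append_assoc]
      · have hb : bsoP mask x = false := by simpa using h
        have h' : ¬ ((PySem.Int.floordiv (PySem.Int.band x mask) mask == 0) = true) := h
        rw [if_neg h', ih, List.filter_cons_of_neg (by simp [hb]),
            List.filter_cons_of_pos (by simp [hb])]
        simp [List.append_assoc]

-- A's first loop builds a zero list and the two counts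
lemma countA_fold (mask : Int) (s : List Int) (B : List Int) (c0 c1 : Int) :
    s.foldl (fun (st : List Int × Int × Int) x =>
      if PySem.Int.floordiv (PySem.Int.band x mask) mask == 0
      then (st.1 ++ [(0 : Int)], st.2.1 + 1, st.2.2)
      else (st.1 ++ [(0 : Int)], st.2.1, st.2.2 + 1)) (B, c0, c1)
    = (B ++ List.replicate s.length 0,
       c0 + ((s.filter (bsoP mask)).length : Int),
       c1 + ((s.filter (fun x => !bsoP mask x)).length : Int)) := by
  induction s generalizing B c0 c1 with
  | nil => simp
  | cons x t ih =>
      simp only [List.foldl_cons]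
      by_cases h : bsoP mask x = true
      · have h' : (PySem.Int.floordiv (PySem.Int.band x mask) mask == 0) = true := h
        rw [if_pos h', ih, List.filter_cons_of_pos h, List.filter_cons_of_neg (by simp [h])]
        refine Prod.ext ?_ (Prod.ext ?_ ?_)
        · simp [List.replicate_succ, List.append_assoc]
        · simp only [List.length_cons]; push_cast; ring
        · simp
      · have hb : bsoP mask x = false := by simpa using h
        have h' : ¬ ((PySem.Int.floordiv (PySem.Int.band x mask) mask == 0) = true) := h
        rw [if_neg h', ih, List.filter_cons_of_neg (by simp [hb]),
            List.filter_cons_of_pos (by simp [hb])]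
        refine Prod.ext ?_ (Prod.ext ?_ ?_)
        · simp [List.replicate_succ, List.append_assoc]
        · simp
        · simp only [List.length_cons]; push_cast; ring

-- set at the last cell of a replicate block sitting after a prefix
lemma set_mid (pre : List Int) (m : Nat) (rest : List Int) (x : Int) :
    (pre ++ (List.replicate (m+1) 0 ++ rest)).set (pre.length + m) x
    = pre ++ (List.replicate m 0 ++ (x :: rest)) := by
  rw [List.set_append_right _ _ (by omega)]
  congr 1
  have : List.replicate (m+1) (0:Int) = List.replicate m 0 ++ [0] := by
    simp [List.replicate_succ']
  rw [this, List.append_assoc, List.set_append_right _ _ (by simp),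
      Nat.add_sub_cancel_left]
  simp [List.length_replicate]

-- invariant of the backward placement loop
lemma place_inv (As : List Int) (mask : Int) :
    ∀ k, k ≤ As.length →
    bsoPlace As mask k
      (List.replicate ((As.take k).filter (bsoP mask)).length 0
        ++ ((As.drop k).filter (bsoP mask)
        ++ (List.replicate ((As.take k).filter (fun x => !bsoP mask x)).length 0
        ++ (As.drop k).filter (fun x => !bsoP mask x))))
      (((As.take k).filter (bsoP mask)).length : Int)
      (((As.filter (bsoP mask)).length + ((As.take k).filter (fun x => !bsoP mask x)).length : Nat) : Int)
    = As.filter (bsoP mask) ++ As.filter (fun x => !bsoP mask x) := by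
  intro k
  induction k with
  | zero => intro _; simp [bsoPlace]
  | succ k ih =>
      intro hk
      have hklt : k < As.length := by omega
      have hx : As.drop k = As[k] :: As.drop (k+1) := List.drop_eq_getElem_cons hklt
      have htake : As.take (k+1) = As.take k ++ [As[k]] := by
        rw [List.take_add_one]
        simp [List.getElem?_eq_getElem hklt]
      have hget : PySem.List.pyGetD As (k : Int) 0 = As[k] := by
        simp [PySem.List.pyGetD_natCast, List.getD, List.getElem?_eq_getElem hklt]
      simp only [bsoPlace]
      rw [hget]
      by_cases h : bsoP mask As[k] = true
      · -- As[k] goes to the zeros bucket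
        have hf0 : (As.take (k+1)).filter (bsoP mask)
            = (As.take k).filter (bsoP mask) ++ [As[k]] := by
          rw [htake, List.filter_append]; simp [h]
        have hf1 : (As.take (k+1)).filter (fun x => !bsoP mask x)
            = (As.take k).filter (fun x => !bsoP mask x) := by
          rw [htake, List.filter_append]; simp [h]
        have hd0 : (As.drop k).filter (bsoP mask)
            = As[k] :: (As.drop (k+1)).filter (bsoP mask) := by
          rw [hx, List.filter_cons_of_pos h]
        have hd1 : (As.drop k).filter (fun x => !bsoP mask x)
            = (As.drop (k+1)).filter (fun x => !bsoP mask x) := by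
          rw [hx, List.filter_cons_of_neg (by simp [h])]
        have h' : (PySem.Int.floordiv (PySem.Int.band As[k] mask) mask == 0) = true := h
        rw [if_pos h']
        have hc0 : ((((As.take (k+1)).filter (bsoP mask)).length : Int) - 1)
            = ((((As.take k).filter (bsoP mask)).length : Nat) : Int) := by
          rw [hf0, List.length_append, List.length_singleton]; push_cast; ring
        rw [hc0, PySem.List.pySetD_natCast]
        have hset :
            (List.replicate ((As.take (k+1)).filter (bsoP mask)).length 0
              ++ ((As.drop (k+1)).filter (bsoP mask)
              ++ (List.replicate ((As.take (k+1)).filter (fun x => !bsoP mask x)).length 0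
              ++ (As.drop (k+1)).filter (fun x => !bsoP mask x)))).set
              ((As.take k).filter (bsoP mask)).length As[k]
            = List.replicate ((As.take k).filter (bsoP mask)).length 0
              ++ ((As.drop k).filter (bsoP mask)
              ++ (List.replicate ((As.take k).filter (fun x => !bsoP mask x)).length 0
              ++ (As.drop k).filter (fun x => !bsoP mask x))) := by
          have := set_mid [] ((As.take k).filter (bsoP mask)).length
            ((As.drop (k+1)).filter (bsoP mask)
              ++ (List.replicate ((As.take (k+1)).filter (fun x => !bsoP mask x)).length 0
              ++ (As.drop (k+1)).filter (fun x => !bsoP mask x))) As[k]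
          simpa [hf0, hf1, hd0, hd1, List.length_append] using this
        rw [hset, hf1]
        exact ih (by omega)
      · -- As[k] goes to the ones bucket
        have hb : bsoP mask As[k] = false := by simpa using h
        have hf0 : (As.take (k+1)).filter (bsoP mask)
            = (As.take k).filter (bsoP mask) := by
          rw [htake, List.filter_append]; simp [hb]
        have hf1 : (As.take (k+1)).filter (fun x => !bsoP mask x)
            = (As.take k).filter (fun x => !bsoP mask x) ++ [As[k]] := by
          rw [htake, List.filter_append]; simp [hb]
        have hd0 : (As.drop k).filter (bsoP mask)
            = (As.drop (k+1)).filter (bsoP mask) := by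
          rw [hx, List.filter_cons_of_neg (by simp [hb])]
        have hd1 : (As.drop k).filter (fun x => !bsoP mask x)
            = As[k] :: (As.drop (k+1)).filter (fun x => !bsoP mask x) := by
          rw [hx, List.filter_cons_of_pos (by simp [hb])]
        have h' : ¬ ((PySem.Int.floordiv (PySem.Int.band As[k] mask) mask == 0) = true) := h
        rw [if_neg h']
        have hc1 : ((((As.filter (bsoP mask)).length
              + ((As.take (k+1)).filter (fun x => !bsoP mask x)).length : Nat) : Int) - 1)
            = ((((As.filter (bsoP mask)).length
              + ((As.take k).filter (fun x => !bsoP mask x)).length : Nat) : Int)) := by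
          rw [hf1, List.length_append, List.length_singleton]; push_cast; ring
        rw [hc1, PySem.List.pySetD_natCast]
        have hlenZ : ((As.take (k+1)).filter (bsoP mask)).length
              + ((As.drop (k+1)).filter (bsoP mask)).length
            = (As.filter (bsoP mask)).length := by
          rw [← List.length_append, ← List.filter_append, List.take_append_drop]
        have hset :
            (List.replicate ((As.take (k+1)).filter (bsoP mask)).length 0
              ++ ((As.drop (k+1)).filter (bsoP mask)
              ++ (List.replicate ((As.take (k+1)).filter (fun x => !bsoP mask x)).length 0
              ++ (As.drop (k+1)).filter (fun x => !bsoP mask x)))).set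
              ((As.filter (bsoP mask)).length
                + ((As.take k).filter (fun x => !bsoP mask x)).length) As[k]
            = List.replicate ((As.take k).filter (bsoP mask)).length 0
              ++ ((As.drop k).filter (bsoP mask)
              ++ (List.replicate ((As.take k).filter (fun x => !bsoP mask x)).length 0
              ++ (As.drop k).filter (fun x => !bsoP mask x))) := by
          have := set_mid
            (List.replicate ((As.take (k+1)).filter (bsoP mask)).length 0
              ++ (As.drop (k+1)).filter (bsoP mask))
            ((As.take k).filter (fun x => !bsoP mask x)).length
            ((As.drop (k+1)).filter (fun x => !bsoP mask x)) As[k]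
          rw [List.length_append, List.length_replicate, hlenZ] at this
          simpa [hf0, hf1, hd0, hd1, List.append_assoc] using this
        rw [hset, hf0]
        exact ih (by omega)

-- the main agreement: A's counting sort equals B's partition, for every mask
lemma ports_agree (A : List Int) (i : Int) :
    bitwiseStableOrdering A i = bitwiseStableOrdering_alt A i := by
  simp only [bitwiseStableOrdering, bitwiseStableOrdering_alt]
  rw [countA_fold, alt_fold]
  simp only [List.nil_append, zero_add]
  have h := place_inv A (2 ^ i.toNat) A.length (le_refl _)
  simp only [List.take_length, List.drop_length, List.filter_nil,
    List.nil_append, List.append_nil] at h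
  have hrep : List.replicate (A.filter (bsoP (2 ^ i.toNat))).length (0:Int)
      ++ List.replicate (A.filter (fun x => !bsoP (2 ^ i.toNat) x)).length 0
      = List.replicate A.length 0 := by
    rw [← List.replicate_add]
    congr 1
    rw [← List.length_append, (List.filter_append_perm (bsoP (2 ^ i.toNat)) A).length_eq]
  have hcast : ((A.filter (fun x => !bsoP (2 ^ i.toNat) x)).length : Int)
      + ((A.filter (bsoP (2 ^ i.toNat))).length : Int)
      = (((A.filter (bsoP (2 ^ i.toNat))).length
          + (A.filter (fun x => !bsoP (2 ^ i.toNat) x)).length : Nat) : Int) := by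
    push_cast; ring
  rw [← hrep, hcast]
  exact h

-- ===== VERDICT (by name: the statement is the Claim_ definition above) =====
theorem bitwiseStableOrdering_spec : Claim_equal_bitwiseStableOrdering := by
  intro A i _ _
  unfold Spec_bitwiseStableOrdering
  exact ports_agree A i
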